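-- pv_equiv track=rewrite | github.com/anaarmada/noisR | estatística_1.py | integers
-- ===== SOURCE A (Python) =====
-- def integers(lst,new):
--     current=0
--     if len(lst)>=6:
--         for i in range(0,6):
--             if lst[i]=='0':
--                 current+=1
--             else:
--                 current+=2**i
--         new.append(current)
--         return integers(lst[6:-1],new)
--     else:
--         for i in range(len(lst)):
--             if lst[i]=='0':
--                 current+=1
--             else:
--                 current+=2**i
--         new.append(current)
--         return new
-- ===== SOURCE B (Python) =====
-- def integers(lst, new):
--     while len(lst) >= 6:
--         new.append(sum(1 if c == '0' else 2**i for i, c in enumerate(lst[:6])))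
--         lst = lst[6:-1]
--     new.append(sum(1 if c == '0' else 2**i for i, c in enumerate(lst)))
--     return new
-- ===== Notes on version B (the rewrite author's own statement) =====
-- stated objective: idiomatic
-- what changed: Replaces the tail recursion with an iterative while-loop over a local lst, and the indexed accumulator for-loops with sum() over enumerate of the chunk/prefix.
import Mathlib
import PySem

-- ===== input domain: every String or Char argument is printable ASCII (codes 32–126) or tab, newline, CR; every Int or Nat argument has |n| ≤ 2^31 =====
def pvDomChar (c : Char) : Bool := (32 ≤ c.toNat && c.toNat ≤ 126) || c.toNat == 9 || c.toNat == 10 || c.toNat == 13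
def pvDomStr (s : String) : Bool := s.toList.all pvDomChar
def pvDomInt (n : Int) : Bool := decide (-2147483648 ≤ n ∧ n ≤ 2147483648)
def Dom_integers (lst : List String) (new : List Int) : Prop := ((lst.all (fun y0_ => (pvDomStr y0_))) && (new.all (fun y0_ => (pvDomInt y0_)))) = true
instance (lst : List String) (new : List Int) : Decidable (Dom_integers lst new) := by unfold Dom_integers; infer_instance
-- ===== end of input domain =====

-- B replaces A's recursion by an iterative loop and the indexed accumulator loops by sum over enumerate;
-- same return value (A and B both mutate `new` in place in Python; equivalence here is about the returned list).

-- termination helper for both ports: lst[6:-1] is strictly shorter when len(lst) ≥ 6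
theorem pv_slice_len (lst : List String) (h : 6 ≤ lst.length) :
    (PySem.List.slice lst (some 6) (some (-1))).length = lst.length - 7 := by
  have hne : lst ≠ [] := by intro e; rw [e] at h; simp at h
  simp [PySem.List.length_slice, PySem.List.clampIdx, hne]
  omega

-- ===== PORT A =====
def integers (lst : List String) (new : List Int) : List Int :=
  if h : 6 ≤ lst.length then
    let current : Int := (PySem.List.pyRange 0 6 1).foldl
      (fun c i => if PySem.List.pyGetD lst i "" = "0" then c + 1 else c + 2 ^ i.toNat) 0
    integers (PySem.List.slice lst (some 6) (some (-1))) (new ++ [current])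
  else
    let current : Int := (PySem.List.pyRange 0 (lst.length : Int) 1).foldl
      (fun c i => if PySem.List.pyGetD lst i "" = "0" then c + 1 else c + 2 ^ i.toNat) 0
    new ++ [current]
termination_by lst.length
decreasing_by rw [pv_slice_len lst h]; omega

-- ===== PORT B =====
-- sum(1 if c == '0' else 2**i for i, c in enumerate(chunk))
def chunkVal (chunk : List String) : Int :=
  ((PySem.List.enumerate chunk 0).map (fun p => if p.2 = "0" then (1 : Int) else 2 ^ p.1.toNat)).sum

def integers_alt (lst : List String) (new : List Int) : List Int :=
  if h : 6 ≤ lst.length then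
    -- loop body: new.append(chunk value of lst[:6]); lst = lst[6:-1]
    integers_alt (PySem.List.slice lst (some 6) (some (-1)))
      (new ++ [chunkVal (PySem.List.slice lst none (some 6))])
  else
    new ++ [chunkVal lst]
termination_by lst.length
decreasing_by rw [pv_slice_len lst h]; omega

-- ===== PRECONDITION & SPEC =====
def Spec_integers (lst : List String) (new : List Int) (out : List Int) : Prop := out = integers_alt lst new
instance (lst : List String) (new : List Int) (out : List Int) : Decidable (Spec_integers lst new out) := by unfold Spec_integers; infer_instance

-- ===== CLAIM (what is proved, stated in full; the proofs are below) =====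
def Claim_equal_integers : Prop := ∀ (lst : List String) (new : List Int), Dom_integers lst new → Spec_integers lst new (integers lst new)

-- ===== LEMMAS AND PROOFS =====

theorem fold_eq_chunk (lst : List String) (n : Nat) (hn : n ≤ lst.length) :
    (PySem.List.pyRange 0 (n : Int) 1).foldl
      (fun c i => if PySem.List.pyGetD lst i "" = "0" then c + 1 else c + 2 ^ i.toNat) 0
    = chunkVal (lst.take n) := by
  have hf : (fun (c i : Int) => if PySem.List.pyGetD lst i "" = "0" then c + 1 else c + 2 ^ i.toNat)
      = (fun (c i : Int) => c + (if PySem.List.pyGetD lst i "" = "0" then (1 : Int) else 2 ^ i.toNat)) := by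
    funext c i; by_cases h : PySem.List.pyGetD lst i "" = "0" <;> simp [h]
  rw [hf, PySem.List.foldl_add, zero_add]
  unfold chunkVal
  rw [PySem.List.enumerate_eq_map_pyRange (d := ""), List.map_map]
  have hlen : (lst.take n).length = n := by simp [hn]
  simp only [PySem.List.len_eq, hlen]
  congr 1
  apply List.map_congr_left
  intro i hi
  rw [PySem.List.mem_pyRange_one] at hi
  obtain ⟨k, rfl⟩ : ∃ k : Nat, i = (k : Int) := ⟨i.toNat, by omega⟩
  have hk : k < n := by exact_mod_cast hi.2
  simp only [Function.comp, PySem.List.pyGetD_natCast]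
  have htk : (List.take n lst).getD k "" = lst.getD k "" := by
    simp [List.getD_eq_getElem?_getD, hk]
  rw [htk]

theorem integers_eq_alt (n : Nat) : ∀ (lst : List String) (new : List Int),
    lst.length = n → integers lst new = integers_alt lst new := by
  induction n using Nat.strong_induction_on with
  | _ n ih =>
    intro lst new hlen
    unfold integers integers_alt
    by_cases h : 6 ≤ lst.length
    · rw [dif_pos h, dif_pos h]
      have hch : (PySem.List.pyRange 0 6 1).foldl
          (fun c i => if PySem.List.pyGetD lst i "" = "0" then c + 1 else c + 2 ^ i.toNat) 0
          = chunkVal (PySem.List.slice lst none (some 6)) := by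
        rw [PySem.List.slice_to (xs := lst) (b := 6) (by norm_num)]
        have := fold_eq_chunk lst 6 h
        simpa using this
      rw [hch]
      exact ih ((PySem.List.slice lst (some 6) (some (-1))).length)
        (by rw [pv_slice_len lst h]; omega) _ _ rfl
    · rw [dif_neg h, dif_neg h]
      have := fold_eq_chunk lst lst.length (le_refl _)
      rw [this, List.take_length]

-- ===== VERDICT (by name: the statement is the Claim_ definition above) =====
theorem integers_spec : Claim_equal_integers := by
  intro lst new _
  unfold Spec_integers
  exact integers_eq_alt lst.length lst new rfl
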